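-- pv_equiv track=rewrite | github.com/Volodimirich/PythonEjudjePrac | Moduls/BitCoding.py | shex
-- ===== SOURCE A (Python) =====
-- def shex(n):
--     FinStr=""
--     Numb=str(bin(n))[2:]
--     Rem=6-len(Numb)%6 if len(Numb)%6 else 0
--     Numb="0"*Rem+Numb
--     for i in range (len(Numb)//6):
--         Str=Numb[6*i:6*(i+1)]
--         Str="0b"+Str
--         FinStr+=(chr(32+int(Str,2)))
--     return FinStr
-- ===== SOURCE B (Python) =====
-- def shex(n):
--     # Peel 6 bits at a time from the least-significant end (do-while so n == 0
--     # still yields one chunk), then reverse. Diverges for n < 0 (outside Pre_).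
--     out = []
--     while True:
--         out.append(chr(32 + (n & 63)))
--         n >>= 6
--         if n == 0:
--             break
--     return ''.join(reversed(out))
-- ===== Notes on version B (the rewrite author's own statement) =====
-- stated objective: idiomatic
-- what changed: Replaces the bin()-string, zero-padding and per-chunk int(...,2) re-parsing with direct bit arithmetic: a do-while loop takes n & 63 and shifts n right by 6, then the collected characters are reversed.
-- outside the precondition, e.g. on shex(-5): A raises ValueError, B does not finish within the time limit
import Mathlib
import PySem

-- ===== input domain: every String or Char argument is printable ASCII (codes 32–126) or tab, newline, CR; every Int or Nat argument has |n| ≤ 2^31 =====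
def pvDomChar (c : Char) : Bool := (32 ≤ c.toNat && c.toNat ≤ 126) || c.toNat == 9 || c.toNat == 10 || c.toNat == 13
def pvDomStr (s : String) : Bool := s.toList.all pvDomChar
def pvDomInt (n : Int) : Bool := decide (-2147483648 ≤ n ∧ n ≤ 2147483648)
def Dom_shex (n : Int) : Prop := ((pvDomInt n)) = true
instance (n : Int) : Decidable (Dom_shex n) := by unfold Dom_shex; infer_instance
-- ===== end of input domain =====

-- B replaces the bin()-string + padding + per-chunk int(...,2) parsing with direct
-- bit arithmetic (a do-while peeling 6 bits from the low end, then a reverse); idiomatic.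

-- ===== PORT A =====
-- str(bin(m))[2:] for m > 0, MSB first (no leading zeros); [] for m = 0
def binDigits (m : Nat) : List Char :=
  if m = 0 then [] else binDigits (m / 2) ++ [if m % 2 = 1 then '1' else '0']
termination_by m
decreasing_by exact Nat.div_lt_self (Nat.pos_of_ne_zero (by assumption)) (by norm_num)

-- int(s, 2) for s = "0b" ++ binary digits (exact on such strings: skip the prefix,
-- then fold acc*2 + bit)
def parseBin2 (s : List Char) : Nat :=
  (s.drop 2).foldl (fun a c => 2 * a + (if c = '1' then 1 else 0)) 0

def shex (n : Int) : String :=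
  -- Numb = str(bin(n))[2:]  (n ≥ 0 inside Pre_; bin(0) = "0b0")
  let numb0 : List Char := if n.toNat = 0 then ['0'] else binDigits n.toNat
  -- Rem = 6 - len(Numb)%6 if len(Numb)%6 else 0
  let rem : Nat := if numb0.length % 6 ≠ 0 then 6 - numb0.length % 6 else 0
  -- Numb = "0"*Rem + Numb
  let numb : List Char := List.replicate rem '0' ++ numb0
  -- for i in range(len(Numb)//6): FinStr += chr(32 + int("0b" + Numb[6i:6(i+1)], 2))
  -- (i ranges over 0..k-1, all nonnegative, so List.range is exact; the slice
  -- Numb[6i:6(i+1)] with 0 ≤ 6i ≤ 6(i+1) ≤ len is exactly drop-then-take)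
  let fin : List Char := (List.range (numb.length / 6)).foldl
    (fun s i => s ++ [Char.ofNat (32 + parseBin2 ('0' :: 'b' :: ((numb.drop (6 * i)).take 6)))]) []
  String.ofList fin

-- ===== PORT B =====
-- the do-while: out.append(chr(32 + (n & 63))); n >>= 6; stop when n == 0
-- (n ≥ 0 inside Pre_, so n & 63 = n % 64 and n >> 6 = n / 64 exactly)
def shexAltGo (m : Nat) (out : List Char) : List Char :=
  let out' := out ++ [Char.ofNat (32 + m % 64)]
  if m / 64 = 0 then out' else shexAltGo (m / 64) out'
termination_by m
decreasing_by exact Nat.div_lt_self (Nat.pos_of_ne_zero (fun h => by subst h; simp_all)) (by norm_num)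

def shex_alt (n : Int) : String := String.ofList ((shexAltGo n.toNat []).reverse)

-- ===== PRECONDITION & SPEC =====
-- For n < 0, bin(n)[2:] keeps the 'b' of "-0b…", so A's int("0b…b…", 2) raises ValueError.
def Pre_shex (n : Int) : Prop := 0 ≤ n
instance (n : Int) : Decidable (Pre_shex n) := by unfold Pre_shex; infer_instance
def pvWitness_shex : Int := (5)

def Spec_shex (n : Int) (out : String) : Prop := out = shex_alt n
instance (n : Int) (out : String) : Decidable (Spec_shex n out) := by unfold Spec_shex; infer_instance

-- ===== CLAIM (what is proved, stated in full; the proofs are below) =====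
def Claim_equal_shex : Prop := ∀ (n : Int), Dom_shex n → Pre_shex n → Spec_shex n (shex n)

-- ===== LEMMAS AND PROOFS =====

-- the character A's loop produces from chunk i of the padded bit list
def chunkChar (numb : List Char) (i : Nat) : Char :=
  Char.ofNat (32 + parseBin2 ('0' :: 'b' :: ((numb.drop (6 * i)).take 6)))

-- the list of characters A builds, as a function of the Nat value
def shexChars (m : Nat) : List Char :=
  let numb0 : List Char := if m = 0 then ['0'] else binDigits m
  let rem : Nat := if numb0.length % 6 ≠ 0 then 6 - numb0.length % 6 else 0
  let numb : List Char := List.replicate rem '0' ++ numb0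
  (List.range (numb.length / 6)).foldl (fun s i => s ++ [chunkChar numb i]) []

theorem shex_eq_shexChars (n : Int) : shex n = String.ofList (shexChars n.toNat) := rfl

-- the fixed-width 6-bit binary rendering of x (for x < 64)
def bits6 (x : Nat) : List Char :=
  [if x / 32 % 2 = 1 then '1' else '0', if x / 16 % 2 = 1 then '1' else '0',
   if x / 8 % 2 = 1 then '1' else '0', if x / 4 % 2 = 1 then '1' else '0',
   if x / 2 % 2 = 1 then '1' else '0', if x % 2 = 1 then '1' else '0']

theorem length_bits6 (x : Nat) : (bits6 x).length = 6 := by simp [bits6]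

theorem binDigits_pos (m : Nat) (h : m ≠ 0) :
    binDigits m = binDigits (m / 2) ++ [if m % 2 = 1 then '1' else '0'] := by
  rw [binDigits]; simp [h]

theorem binDigits_split (m : Nat) (h : 64 ≤ m) :
    binDigits m = binDigits (m / 64) ++ bits6 (m % 64) := by
  rw [binDigits_pos m (by omega)]
  rw [binDigits_pos (m / 2) (by omega)]
  rw [binDigits_pos (m / 2 / 2) (by omega)]
  rw [binDigits_pos (m / 2 / 2 / 2) (by omega)]
  rw [binDigits_pos (m / 2 / 2 / 2 / 2) (by omega)]
  rw [binDigits_pos (m / 2 / 2 / 2 / 2 / 2) (by omega)]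
  have e : m / 2 / 2 / 2 / 2 / 2 / 2 = m / 64 := by omega
  rw [e, bits6]
  have h1 : m / 2 / 2 / 2 / 2 / 2 % 2 = m % 64 / 32 % 2 := by omega
  have h2 : m / 2 / 2 / 2 / 2 % 2 = m % 64 / 16 % 2 := by omega
  have h3 : m / 2 / 2 / 2 % 2 = m % 64 / 8 % 2 := by omega
  have h4 : m / 2 / 2 % 2 = m % 64 / 4 % 2 := by omega
  have h5 : m / 2 % 2 = m % 64 / 2 % 2 := by omega
  have h6 : m % 2 = m % 64 % 2 := by omega
  rw [h1, h2, h3, h4, h5, h6]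
  simp

-- foldl-appending singletons is a map
theorem foldl_append_map {α β : Type} (f : α → β) (l : List α) (s : List β) :
    l.foldl (fun s i => s ++ [f i]) s = s ++ l.map f := by
  induction l generalizing s with
  | nil => simp
  | cons a t ih => simp [List.foldl, ih]

theorem chunkChar_prefix (numb t : List Char) (i : Nat) (h : 6 * i + 6 ≤ numb.length) :
    chunkChar (numb ++ t) i = chunkChar numb i := by
  unfold chunkChar
  rw [List.drop_append_of_le_length (by omega)]
  rw [List.take_append_of_le_length (by simp; omega)]

theorem chunkChar_last (numb : List Char) (x k : Nat) (hk : numb.length = 6 * k) :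
    chunkChar (numb ++ bits6 x) k = Char.ofNat (32 + parseBin2 ('0' :: 'b' :: bits6 x)) := by
  unfold chunkChar
  have h6 : 6 * k = numb.length := hk.symm
  rw [h6, List.drop_append_of_le_length (le_refl _), List.drop_length, List.nil_append]
  have ht : (bits6 x).take 6 = bits6 x := by simp [bits6]
  rw [ht]

theorem parseBin2_bits6 (x : Nat) (h : x < 64) : parseBin2 ('0' :: 'b' :: bits6 x) = x := by
  interval_cases x <;> decide

-- appending one full 6-bit chunk appends one character to A's loop output
theorem fold_step (numb : List Char) (x k : Nat) (hx : x < 64) (hk : numb.length = 6 * k) :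
    (List.range ((numb ++ bits6 x).length / 6)).foldl
        (fun s i => s ++ [chunkChar (numb ++ bits6 x) i]) [] =
      (List.range (numb.length / 6)).foldl (fun s i => s ++ [chunkChar numb i]) []
        ++ [Char.ofNat (32 + x)] := by
  have hl : (numb ++ bits6 x).length = 6 * k + 6 := by simp [length_bits6, hk]
  rw [hl, hk]
  have d1 : (6 * k + 6) / 6 = k + 1 := by omega
  have d2 : 6 * k / 6 = k := by omega
  rw [d1, d2, foldl_append_map, foldl_append_map, List.range_succ, List.map_append]
  simp only [List.nil_append]
  congr 1
  · exact List.map_congr_left fun i hi =>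
      chunkChar_prefix numb _ i (by simp only [List.mem_range] at hi; omega)
  · simp [chunkChar_last numb x k hk, parseBin2_bits6 x hx]

-- A's characters satisfy the base-64 recurrence
theorem shexChars_step (m : Nat) (h : 64 ≤ m) :
    shexChars m = shexChars (m / 64) ++ [Char.ofNat (32 + m % 64)] := by
  have hm : m ≠ 0 := by omega
  have hq : m / 64 ≠ 0 := by omega
  unfold shexChars
  simp only [hm, hq, if_false]
  rw [binDigits_split m h]
  generalize binDigits (m / 64) = B
  have hlen : (B ++ bits6 (m % 64)).length = B.length + 6 := by simp [length_bits6]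
  simp only [hlen]
  have hre : (B.length + 6) % 6 = B.length % 6 := by omega
  rw [hre]
  have hdvd : ∃ k,
      (List.replicate (if B.length % 6 ≠ 0 then 6 - B.length % 6 else 0) '0' ++ B).length
        = 6 * k := by
    by_cases h0 : B.length % 6 = 0
    · exact ⟨B.length / 6, by simp [h0]; omega⟩
    · exact ⟨B.length / 6 + 1, by simp [h0]; omega⟩
  obtain ⟨k, hk⟩ := hdvd
  rw [show List.replicate (if B.length % 6 ≠ 0 then 6 - B.length % 6 else 0) '0'
        ++ (B ++ bits6 (m % 64))
      = (List.replicate (if B.length % 6 ≠ 0 then 6 - B.length % 6 else 0) '0' ++ B)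
        ++ bits6 (m % 64) by simp]
  exact fold_step _ (m % 64) k (by omega) hk

-- base case: A on m < 64, by direct evaluation
theorem shexChars_base : ∀ m, m < 64 → shexChars m = [Char.ofNat (32 + m)] := by
  intro m hm
  interval_cases m <;> simp [shexChars, chunkChar, binDigits, parseBin2]

-- B's loop unfolding
theorem shexAltGo_eq (m : Nat) (out : List Char) :
    shexAltGo m out = if m / 64 = 0 then out ++ [Char.ofNat (32 + m % 64)]
      else shexAltGo (m / 64) (out ++ [Char.ofNat (32 + m % 64)]) := by
  rw [shexAltGo]

theorem shexAltGo_out (m : Nat) (out : List Char) :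
    shexAltGo m out = out ++ shexAltGo m [] := by
  induction m using Nat.strong_induction_on generalizing out with
  | _ m ih =>
    rw [shexAltGo_eq m out, shexAltGo_eq m []]
    by_cases h : m / 64 = 0
    · simp [h]
    · simp only [h, if_false]
      have hlt : m / 64 < m := Nat.div_lt_self (by omega) (by norm_num)
      rw [ih (m / 64) hlt (out ++ [Char.ofNat (32 + m % 64)]),
          ih (m / 64) hlt ([] ++ [Char.ofNat (32 + m % 64)])]
      simp

theorem altChars_eq (m : Nat) : (shexAltGo m []).reverse = shexChars m := by
  induction m using Nat.strong_induction_on with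
  | _ m ih =>
    by_cases h : m < 64
    · rw [shexChars_base m h, shexAltGo_eq]
      have h0 : m / 64 = 0 := by omega
      simp [h0, Nat.mod_eq_of_lt h]
    · rw [shexAltGo_eq]
      have hq : m / 64 ≠ 0 := by omega
      simp only [hq, if_false]
      rw [shexAltGo_out, shexChars_step m (by omega),
          ← ih (m / 64) (Nat.div_lt_self (by omega) (by norm_num))]
      simp

-- ===== VERDICT (by name: the statement is the Claim_ definition above) =====
theorem shex_spec : Claim_equal_shex := by
  intro n _ _
  unfold Spec_shex
  rw [shex_eq_shexChars]
  unfold shex_alt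
  rw [altChars_eq]
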